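-- pv_equiv track=rewrite | github.com/MrBrantCode/unitest_baseline | mut_generate/mist_train_cf/cf_65504/solution.py | segregate_sort
-- ===== SOURCE A (Python) =====
-- def is_prime(num):
--     if num > 1:
--         for i in range(2, num):
--             if (num % i) == 0:
--                 return False
--         return True
--     return False
--
-- def segregate_sort(nums):
--     primes, even, odd = [], [], []
--     for num in nums:
--         if is_prime(num):
--             primes.append(num)
--         elif num % 2 == 0:
--             even.append(num)
--         else:
--             odd.append(num)
--
--     return sorted(even), sorted(odd), sorted(primes)
-- ===== SOURCE B (Python) =====
-- def is_prime(num):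
--     if num <= 1:
--         return False
--     d = 2
--     while d * d <= num:
--         if num % d == 0:
--             return False
--         d += 1
--     return True
--
-- def segregate_sort(nums):
--     counts = {}
--     for n in nums:
--         counts[n] = counts.get(n, 0) + 1
--     primes, even, odd = [], [], []
--     for k in sorted(counts):
--         block = [k] * counts[k]
--         if is_prime(k):
--             primes += block
--         elif k % 2 == 0:
--             even += block
--         else:
--             odd += block
--     return even, odd, primes
-- ===== Notes on version B (the rewrite author's own statement) =====
-- stated objective: faster
-- what changed: B builds a value->multiplicity dict in one pass, classifies each DISTINCT value once (with a sqrt-bounded trial division instead of A's division by every i < n) over the sorted keys, and reconstructs each bucket by list repetition, instead of A's per-element full trial division loop plus three bucket sorts.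
import Mathlib
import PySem

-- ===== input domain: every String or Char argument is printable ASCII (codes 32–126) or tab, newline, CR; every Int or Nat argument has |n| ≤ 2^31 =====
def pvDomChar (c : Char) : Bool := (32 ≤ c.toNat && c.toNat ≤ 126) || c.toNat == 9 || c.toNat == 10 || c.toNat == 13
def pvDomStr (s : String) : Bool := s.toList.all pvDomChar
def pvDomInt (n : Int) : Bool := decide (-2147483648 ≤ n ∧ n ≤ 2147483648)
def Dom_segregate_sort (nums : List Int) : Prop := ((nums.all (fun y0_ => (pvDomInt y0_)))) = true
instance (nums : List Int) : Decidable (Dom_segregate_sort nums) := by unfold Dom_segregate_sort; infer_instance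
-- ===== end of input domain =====

-- ===== PORT A =====
-- B replaces per-element full trial division + three bucket sorts by a multiplicity dict,
-- one sqrt-bounded primality test per distinct value over the sorted keys, and list repetition.
-- 'for i in range(2, num)' with early return: counter recursion from i = 2 (exact on every Int).
def primeLoop (num : Int) : Nat → Int → Bool
  | 0, _ => true
  | fuel + 1, i =>
    if PySem.Int.mod num i == 0 then false else primeLoop num fuel (i + 1)

def is_prime (num : Int) : Bool :=
  if num > 1 then primeLoop num (num - 2).toNat 2 else false

def segregate_sort (nums : List Int) : List Int × List Int × List Int :=
  let st := nums.foldl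
    (fun (acc : List Int × List Int × List Int) num =>
      if is_prime num then (acc.1 ++ [num], acc.2.1, acc.2.2)
      else if PySem.Int.mod num 2 == 0 then (acc.1, acc.2.1 ++ [num], acc.2.2)
      else (acc.1, acc.2.1, acc.2.2 ++ [num]))
    ([], [], [])
  (PySem.List.sorted st.2.1 (fun x => x) false,
   PySem.List.sorted st.2.2 (fun x => x) false,
   PySem.List.sorted st.1 (fun x => x) false)

-- ===== PORT B =====
-- Source B's is_prime: 'while d * d <= num' counter loop with early return on a divisor.
def sqrtLoop (num : Int) : Nat → Int → Bool
  | 0, _ => true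
  | fuel + 1, d =>
    if d * d ≤ num then
      (if PySem.Int.mod num d == 0 then false else sqrtLoop num fuel (d + 1))
    else true

def is_prime_alt (num : Int) : Bool :=
  if num ≤ 1 then false else sqrtLoop num num.toNat 2

def segregate_sort_alt (nums : List Int) : List Int × List Int × List Int :=
  let counts := nums.foldl (fun (d : PySem.Dict Int Int) n => d.insert n (d.getD n 0 + 1)) PySem.Dict.empty
  let st := (PySem.List.sorted counts.keys (fun x => x) false).foldl
    (fun (acc : List Int × List Int × List Int) k =>
      let block := List.replicate (counts.getD k 0).toNat k
      if is_prime_alt k then (acc.1 ++ block, acc.2.1, acc.2.2)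
      else if PySem.Int.mod k 2 == 0 then (acc.1, acc.2.1 ++ block, acc.2.2)
      else (acc.1, acc.2.1, acc.2.2 ++ block))
    ([], [], [])
  (st.2.1, st.2.2, st.1)

-- ===== PRECONDITION & SPEC =====
def Spec_segregate_sort (nums : List Int) (out : List Int × List Int × List Int) : Prop := out = segregate_sort_alt nums
instance (nums : List Int) (out : List Int × List Int × List Int) : Decidable (Spec_segregate_sort nums out) := by unfold Spec_segregate_sort; infer_instance

-- ===== CLAIM (what is proved, stated in full; the proofs are below) =====
def Claim_equal_segregate_sort : Prop := ∀ (nums : List Int), Dom_segregate_sort nums → Spec_segregate_sort nums (segregate_sort nums)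

-- ===== LEMMAS AND PROOFS =====

-- A's loop tests num % i for every i in [lo, num); characterize it.
theorem primeLoop_eq_true_iff (num : Int) (fuel : Nat) (i : Int)
    (hf : fuel = (num - i).toNat) :
    primeLoop num fuel i = true ↔ ∀ j, i ≤ j → j < num → PySem.Int.mod num j ≠ 0 := by
  induction fuel generalizing i with
  | zero =>
    simp only [primeLoop, true_iff]
    intro j hj1 hj2
    omega
  | succ fuel ih =>
    rw [primeLoop]
    by_cases hm : (PySem.Int.mod num i == 0) = true
    · rw [if_pos hm]
      simp only [Bool.false_eq_true, false_iff]
      intro hall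
      exact hall i le_rfl (by omega) (by simpa using hm)
    · rw [if_neg hm, ih (i + 1) (by omega)]
      constructor
      · intro hall j hj1 hj2
        rcases eq_or_lt_of_le hj1 with rfl | hlt
        · simpa using hm
        · exact hall j (by omega) hj2
      · intro hall j hj1 hj2
        exact hall j (by omega) hj2

-- B's loop tests num % d for every d ≥ lo with d*d ≤ num (lo ≥ 2 keeps squares monotone);
-- the fuel only bounds the iteration count.
theorem sqrtLoop_eq_true_iff (num : Int) (fuel : Nat) (d : Int) (hd : 2 ≤ d)
    (hf : (num + 1 - d).toNat ≤ fuel) :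
    sqrtLoop num fuel d = true ↔ ∀ j, d ≤ j → j * j ≤ num → PySem.Int.mod num j ≠ 0 := by
  induction fuel generalizing d with
  | zero =>
    simp only [sqrtLoop, true_iff]
    intro j hj1 hj2 _
    have hnd : num < d := by omega
    nlinarith
  | succ fuel ih =>
    rw [sqrtLoop]
    by_cases hle : d * d ≤ num
    · rw [if_pos hle]
      have hdn : d ≤ num := by nlinarith
      by_cases hm : (PySem.Int.mod num d == 0) = true
      · rw [if_pos hm]
        simp only [Bool.false_eq_true, false_iff]
        intro hall
        exact hall d le_rfl hle (by simpa using hm)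
      · rw [if_neg hm, ih (d + 1) (by omega) (by omega)]
        constructor
        · intro hall j hj1 hj2
          rcases eq_or_lt_of_le hj1 with rfl | hlt
          · simpa using hm
          · exact hall j (by omega) hj2
        · intro hall j hj1 hj2
          exact hall j (by omega) hj2
    · rw [if_neg hle]
      simp only [true_iff]
      intro j hj1 hj2
      have : d * d ≤ j * j := by nlinarith
      omega

-- trial division to num and trial division to sqrt find the same composites (n > 1).
theorem is_prime_eq (num : Int) : is_prime num = is_prime_alt num := by
  unfold is_prime is_prime_alt
  by_cases h1 : num > 1
  · rw [if_pos h1, if_neg (by omega), Bool.eq_iff_iff,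
      primeLoop_eq_true_iff num (num - 2).toNat 2 rfl,
      sqrtLoop_eq_true_iff num num.toNat 2 (by omega) (by omega)]
    constructor
    · intro hall j hj2 hjsq
      exact hall j hj2 (by nlinarith)
    · intro hall j hj2 hjlt hjm
      by_cases hsq : j * j ≤ num
      · exact hall j hj2 hsq hjm
      · have hmod : PySem.Int.mod num j = num % j :=
          PySem.Int.mod_eq_emod_of_pos (by omega)
        have hdvd : j ∣ num := Int.dvd_of_emod_eq_zero (by rw [← hmod]; exact hjm)
        obtain ⟨e, he⟩ := hdvd
        have he2 : 2 ≤ e := by nlinarith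
        have hesq : e * e ≤ num := by nlinarith
        refine hall e he2 hesq ?_
        rw [PySem.Int.mod_eq_emod_of_pos (by omega)]
        exact Int.emod_eq_zero_of_dvd ⟨j, by rw [he]; ring⟩
  · rw [if_neg h1, if_pos (by omega)]

-- A's loop appends each element to exactly one bucket: the final state is three filters.
theorem segregate_fold_eq (nums : List Int) (a b c : List Int) :
    nums.foldl
      (fun (acc : List Int × List Int × List Int) num =>
        if is_prime num then (acc.1 ++ [num], acc.2.1, acc.2.2)
        else if PySem.Int.mod num 2 == 0 then (acc.1, acc.2.1 ++ [num], acc.2.2)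
        else (acc.1, acc.2.1, acc.2.2 ++ [num]))
      (a, b, c)
    = (a ++ nums.filter (fun n => is_prime n),
       b ++ nums.filter (fun n => !is_prime n && PySem.Int.mod n 2 == 0),
       c ++ nums.filter (fun n => !is_prime n && !(PySem.Int.mod n 2 == 0))) := by
  induction nums generalizing a b c with
  | nil => simp
  | cons x xs ih =>
    rw [List.foldl_cons, List.filter_cons, List.filter_cons, List.filter_cons]
    by_cases hp : is_prime x <;> by_cases he : PySem.Int.mod x 2 == 0 <;>
      simp only [hp, he, Bool.not_true, Bool.not_false, Bool.false_and, Bool.true_and,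
        if_true, if_false, Bool.false_eq_true, ih, List.append_assoc, List.singleton_append]

-- notation for B's per-key block and its bucket contents
def blk (nums : List Int) (p : Int → Bool) (k : Int) : List Int :=
  if p k then List.replicate (nums.count k) k else []

-- B's dispatch loop over the keys ends with three concatenations of blocks.
theorem bucket_fold_eq (nums : List Int) (ks : List Int) (a b c : List Int) :
    ks.foldl
      (fun (acc : List Int × List Int × List Int) k =>
        if is_prime_alt k then (acc.1 ++ List.replicate ((PySem.Dict.counter nums).getD k 0).toNat k, acc.2.1, acc.2.2)
        else if PySem.Int.mod k 2 == 0 then (acc.1, acc.2.1 ++ List.replicate ((PySem.Dict.counter nums).getD k 0).toNat k, acc.2.2)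
        else (acc.1, acc.2.1, acc.2.2 ++ List.replicate ((PySem.Dict.counter nums).getD k 0).toNat k))
      (a, b, c)
    = (a ++ ks.flatMap (blk nums (fun n => is_prime_alt n)),
       b ++ ks.flatMap (blk nums (fun n => !is_prime_alt n && PySem.Int.mod n 2 == 0)),
       c ++ ks.flatMap (blk nums (fun n => !is_prime_alt n && !(PySem.Int.mod n 2 == 0)))) := by
  induction ks generalizing a b c with
  | nil => simp
  | cons k ks ih =>
    have hc : ((PySem.Dict.counter nums).getD k 0).toNat = nums.count k := by
      rw [PySem.Dict.getD_counter]; exact Int.toNat_natCast _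
    rw [List.foldl_cons, List.flatMap_cons, List.flatMap_cons, List.flatMap_cons]
    by_cases hp : is_prime_alt k <;> by_cases he : PySem.Int.mod k 2 == 0 <;>
      simp only [blk, hp, he, Bool.not_true, Bool.not_false, Bool.false_and, Bool.true_and,
        if_true, if_false, Bool.false_eq_true, hc, ih, List.append_assoc,
        List.nil_append]

-- each block holds copies of its own key only
theorem mem_blk {nums : List Int} {p : Int → Bool} {k x : Int} (h : x ∈ blk nums p k) : x = k := by
  unfold blk at h
  split at h
  · exact List.eq_of_mem_replicate h
  · simp at h

-- multiplicity of x in a concatenation of blocks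
theorem count_flatMap_blk (nums ks : List Int) (p : Int → Bool) (x : Int) :
    (ks.flatMap (blk nums p)).count x = ks.count x * (if p x then nums.count x else 0) := by
  induction ks with
  | nil => simp
  | cons k ks ih =>
    rw [List.flatMap_cons, List.count_append, ih, List.count_cons]
    by_cases hxk : x = k
    · subst hxk
      by_cases hpk : p x = true <;> simp [blk, hpk] <;> ring
    · have hkx : ¬ k = x := fun h => hxk h.symm
      by_cases hpk : p k = true <;>
        simp [blk, hpk, hkx, List.count_replicate]

-- blocks listed along strictly increasing keys are in non-decreasing order
theorem pairwise_flatMap_blk (nums : List Int) (p : Int → Bool) (ks : List Int)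
    (h : ks.Pairwise (· < ·)) : (ks.flatMap (blk nums p)).Pairwise (· ≤ ·) := by
  induction ks with
  | nil => simp
  | cons k ks ih =>
    rw [List.flatMap_cons, List.pairwise_append]
    rw [List.pairwise_cons] at h
    refine ⟨?_, ih h.2, ?_⟩
    · unfold blk
      split
      · exact List.pairwise_replicate.mpr (Or.inr le_rfl)
      · simp
    · intro x hx y hy
      rw [mem_blk hx]
      obtain ⟨k', hk', hy'⟩ := List.mem_flatMap.mp hy
      rw [mem_blk hy']
      exact le_of_lt (h.1 k' hk')

-- the concatenation of blocks over the sorted distinct values IS the sorted filtered list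
theorem flatMap_blk_eq_sorted (nums : List Int) (p : Int → Bool) :
    (PySem.List.sorted (PySem.Set.ofList nums) (fun x => x) false).flatMap (blk nums p)
      = PySem.List.sorted (nums.filter p) (fun x => x) false := by
  have hpl := PySem.List.sorted_ofList_pairwise_lt (xs := nums)
  refine (PySem.List.sorted_id_eq_of_perm_of_pairwise _ _ ?_ (pairwise_flatMap_blk nums p _ hpl)).symm
  have hnd : (PySem.List.sorted (PySem.Set.ofList nums) (fun x => x) false).Nodup :=
    hpl.imp ne_of_lt
  refine List.perm_iff_count.mpr fun x => ?_
  rw [count_flatMap_blk]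
  by_cases hpx : p x = true
  · rw [if_pos hpx, List.count_filter hpx]
    by_cases hmem : x ∈ nums
    · have hxk : x ∈ PySem.List.sorted (PySem.Set.ofList nums) (fun x => x) false := by
        rw [PySem.List.mem_sorted, PySem.Set.mem_ofList]; exact hmem
      rw [List.count_eq_one_of_mem hnd hxk, one_mul]
    · simp [List.count_eq_zero_of_not_mem hmem]
  · rw [if_neg hpx, Nat.mul_zero]
    refine (List.count_eq_zero.mpr ?_).symm
    intro hx
    exact hpx (List.of_mem_filter hx)

-- ===== VERDICT (by name: the statement is the Claim_ definition above) =====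
theorem segregate_sort_spec : Claim_equal_segregate_sort := by
  intro nums _
  unfold Spec_segregate_sort
  show segregate_sort nums = segregate_sort_alt nums
  simp only [segregate_sort, segregate_sort_alt,
    PySem.Dict.foldl_insert_getD_add_one_eq_counter, PySem.Dict.keys_counter]
  rw [segregate_fold_eq nums [] [] [],
    bucket_fold_eq nums (PySem.List.sorted (PySem.Set.ofList nums) (fun x => x) false) [] [] []]
  simp only [List.nil_append]
  have hfc : ∀ (q q' : Int → Bool), (∀ x, q x = q' x) → nums.filter q = nums.filter q' :=
    fun q q' h => List.filter_congr (fun x _ => h x)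
  refine congrArg₂ Prod.mk ?_ (congrArg₂ Prod.mk ?_ ?_)
  · rw [hfc _ (fun n => !is_prime_alt n && PySem.Int.mod n 2 == 0) (fun x => by rw [is_prime_eq])]
    exact (flatMap_blk_eq_sorted nums _).symm
  · rw [hfc _ (fun n => !is_prime_alt n && !(PySem.Int.mod n 2 == 0)) (fun x => by rw [is_prime_eq])]
    exact (flatMap_blk_eq_sorted nums _).symm
  · rw [hfc _ (fun n => is_prime_alt n) (fun x => by rw [is_prime_eq])]
    exact (flatMap_blk_eq_sorted nums _).symm
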